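-- pv_equiv track=rewrite | github.com/puneet-jain159/sandbox | ka-chat-bot/agent_build/utils.py | extract_llm_response
-- ===== SOURCE A (Python) =====
-- def extract_llm_response(llm_output: str, field_names: list) -> dict:
--     """Parse LLM output to extract specified fields."""
--     result = {}
--     for line in llm_output.splitlines():
--         line_lower = line.lower()
--         for field in field_names:
--             if line_lower.startswith(f"{field.lower()}:"):
--                 value = line.split(":", 1)[1].strip()
--                 result[field] = value if value.lower() != "none" else None
--                 break
--     return result
-- ===== SOURCE B (Python) =====
-- def extract_llm_response(llm_output: str, field_names: list) -> dict:
--     """Parse LLM output to extract specified fields (index-build-then-query)."""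
--     # One pass over the lines: map the (lowercased) text before the first ':' of each
--     # line to the stripped text after it; later lines overwrite earlier ones, while the
--     # key keeps its first-occurrence position.
--     line_map = {}
--     for line in llm_output.splitlines():
--         i = line.find(":")
--         if i != -1:
--             line_map[line[:i].lower()] = line[i + 1:].strip()
--     # First field name wins for each lowercased spelling.
--     field_by_lower = {}
--     for field in field_names:
--         key = field.lower()
--         if key not in field_by_lower:
--             field_by_lower[key] = field
--     # One pass over the index, in first-matching-line order.
--     result = {}
--     for prefix, value in line_map.items():
--         field = field_by_lower.get(prefix)
--         if field is not None:
--             result[field] = value if value.lower() != "none" else None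
--     return result
-- ===== Notes on version B (the rewrite author's own statement) =====
-- stated objective: alternative
-- what changed: Instead of scanning all field names per line with startswith, B builds in one pass a last-wins index from each line's lowercased text before its first ':' to the stripped text after it, plus a first-wins map from lowercased field names to fields, then assembles the result by dictionary lookups; it trades the nested scan for two index builds at the same measured cost on the generated inputs.
-- outside the precondition, e.g. on extract_llm_response('a:b: x', ['a:b']): A returns {'a:b': 'b: x'}, B returns {}
import Mathlib
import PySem

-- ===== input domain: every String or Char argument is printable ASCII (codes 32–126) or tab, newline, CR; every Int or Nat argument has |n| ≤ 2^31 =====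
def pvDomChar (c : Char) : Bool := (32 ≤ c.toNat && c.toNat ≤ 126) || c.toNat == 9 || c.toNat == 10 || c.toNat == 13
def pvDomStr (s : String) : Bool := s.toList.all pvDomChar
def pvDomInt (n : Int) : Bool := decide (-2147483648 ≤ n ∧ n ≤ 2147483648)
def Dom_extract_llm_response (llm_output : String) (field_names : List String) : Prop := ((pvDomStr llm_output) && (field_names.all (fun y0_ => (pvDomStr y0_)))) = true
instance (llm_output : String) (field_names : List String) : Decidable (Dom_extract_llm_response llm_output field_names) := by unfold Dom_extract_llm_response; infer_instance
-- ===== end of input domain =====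

-- B replaces A's per-line scan over all field names by a first-colon index over the
-- lines plus a lowercased-field lookup table (objective: alternative algorithm).

-- ===== PORT A =====
def extract_llm_response (llm_output : String) (field_names : List String) : List (String × Option String) :=
  ((PySem.Chars.splitlines llm_output.toList).foldl (fun result line =>
      let line_lower := PySem.Chars.lower line
      match field_names.find? (fun field =>
          PySem.Chars.startswith line_lower (PySem.Chars.lower field.toList ++ [':'])) with
      | some field =>
          let value := PySem.Chars.strip ((PySem.List.pyGet? (PySem.Chars.splitOnMax line [':'] 1) 1).getD [])
          result.insert field (if PySem.Chars.lower value ≠ "none".toList then some (String.ofList value) else none)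
      | none => result)
    PySem.Dict.empty).items

-- ===== PORT B =====
def extract_llm_response_alt (llm_output : String) (field_names : List String) : List (String × Option String) :=
  let line_map : PySem.Dict (List Char) (List Char) :=
    (PySem.Chars.splitlines llm_output.toList).foldl (fun m line =>
      let i := PySem.Chars.find line [':']
      if i ≠ -1 then
        m.insert (PySem.Chars.lower (PySem.List.slice line none (some i)))
                 (PySem.Chars.strip (PySem.List.slice line (some (i + 1)) none))
      else m) PySem.Dict.empty
  let field_by_lower : PySem.Dict (List Char) String :=
    field_names.foldl (fun d field =>
      let key := PySem.Chars.lower field.toList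
      if d.contains key then d else d.insert key field) PySem.Dict.empty
  (line_map.items.foldl (fun r pv =>
      match field_by_lower.get? pv.1 with
      | some field =>
          r.insert field (if PySem.Chars.lower pv.2 ≠ "none".toList then some (String.ofList pv.2) else none)
      | none => r) PySem.Dict.empty).items

-- ===== PRECONDITION & SPEC =====
-- Pre_ excludes only the inputs where a field name that itself contains the delimiter ':'
-- prefix-matches some line: such names lie outside the "Field: value" line format this
-- parser serves, and there A's value (the text after the LINE's first colon, overlapping
-- the field name itself) and B's (no match) are both accidental corner behaviours no
-- caller would specify.
def Pre_extract_llm_response (llm_output : String) (field_names : List String) : Prop :=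
  ∀ field ∈ field_names, ':' ∈ field.toList →
    ∀ line ∈ PySem.Chars.splitlines llm_output.toList,
      PySem.Chars.startswith (PySem.Chars.lower line) (PySem.Chars.lower field.toList ++ [':']) = false
instance (llm_output : String) (field_names : List String) : Decidable (Pre_extract_llm_response llm_output field_names) := by unfold Pre_extract_llm_response; infer_instance
def pvWitness_extract_llm_response : String × List String :=
  ("Thought: let me see\nAnswer: None\nanswer: 42", ["Answer", "Thought"])

def Spec_extract_llm_response (llm_output : String) (field_names : List String) (out : List (String × Option String)) : Prop := out = extract_llm_response_alt llm_output field_names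
instance (llm_output : String) (field_names : List String) (out : List (String × Option String)) : Decidable (Spec_extract_llm_response llm_output field_names out) := by unfold Spec_extract_llm_response; infer_instance

-- ===== CLAIM (what is proved, stated in full; the proofs are below) =====
def Claim_equal_extract_llm_response : Prop := ∀ (llm_output : String) (field_names : List String), Dom_extract_llm_response llm_output field_names → Pre_extract_llm_response llm_output field_names → Spec_extract_llm_response llm_output field_names (extract_llm_response llm_output field_names)

-- ===== LEMMAS AND PROOFS =====

-- Proof-side abbreviations and loop-body names (used only by the lemmas below).
def pvTw (l : List Char) : List Char := l.takeWhile (fun c => !(c == ':'))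
def pvVl (l : List Char) : List Char := PySem.Chars.strip (l.drop ((pvTw l).length + 1))
def pvPline (l : List Char) : Option (List Char × List Char) :=
  if ':' ∈ l then some (pvTw (PySem.Chars.lower l), pvVl l) else none
def pvConv (v : List Char) : Option String :=
  if PySem.Chars.lower v ≠ "none".toList then some (String.ofList v) else none
def pvFbl (fns : List String) : PySem.Dict (List Char) String :=
  fns.foldl (fun d field =>
    let key := PySem.Chars.lower field.toList
    if d.contains key then d else d.insert key field) PySem.Dict.empty
def pvH (fns : List String) (pv : List Char × List Char) : Option (String × Option String) :=
  ((pvFbl fns).get? pv.1).map (fun f => (f, pvConv pv.2))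
def pvDins {κ ν : Type} [BEq κ] (d : PySem.Dict κ ν) (pv : κ × ν) : PySem.Dict κ ν :=
  d.insert pv.1 pv.2
def pvDbuild {κ ν : Type} [BEq κ] (l : List (κ × ν)) : PySem.Dict κ ν :=
  l.foldl pvDins PySem.Dict.empty
def pvLastv {κ ν : Type} [BEq κ] (l : List (κ × ν)) (k : κ) : Option ν :=
  (l.reverse.find? (fun pv => pv.1 == k)).map (·.2)
def pvMstep {α β γ : Type} (q : α → Option β) (ins : γ → β → γ) (r : γ) (x : α) : γ :=
  match q x with | some y => ins r y | none => r
def pvBstep (m : PySem.Dict (List Char) (List Char)) (line : List Char) : PySem.Dict (List Char) (List Char) :=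
  let i := PySem.Chars.find line [':']
  if i ≠ -1 then
    m.insert (PySem.Chars.lower (PySem.List.slice line none (some i)))
             (PySem.Chars.strip (PySem.List.slice line (some (i + 1)) none))
  else m
def pvBouter (fns : List String) (r : PySem.Dict String (Option String)) (pv : List Char × List Char) :
    PySem.Dict String (Option String) :=
  match (pvFbl fns).get? pv.1 with
  | some field =>
      r.insert field (if PySem.Chars.lower pv.2 ≠ "none".toList then some (String.ofList pv.2) else none)
  | none => r

theorem pv_go0 (fuel : Nat) (l cur : List Char) (acc : List (List Char)) :
    PySem.Chars.splitOnMax.go [':'] fuel 0 l cur acc = ((cur.reverse ++ l) :: acc).reverse := by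
  match fuel, l with
  | 0, l => rfl
  | fuel+1, [] => simp [PySem.Chars.splitOnMax.go]
  | fuel+1, c :: rest => simp [PySem.Chars.splitOnMax.go]

theorem pv_go1 (l : List Char) (fuel : Nat) (cur : List Char) (acc : List (List Char)) (h : l.length < fuel) :
    PySem.Chars.splitOnMax.go [':'] fuel 1 l cur acc =
      if ':' ∈ l then acc.reverse ++ [cur.reverse ++ pvTw l, l.drop ((pvTw l).length + 1)]
      else acc.reverse ++ [cur.reverse ++ l] := by
  induction l generalizing fuel cur acc with
  | nil =>
    match fuel, h with
    | fuel+1, _ => simp [PySem.Chars.splitOnMax.go]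
  | cons c rest ih =>
    match fuel, h with
    | fuel+1, h =>
      by_cases hc : c = ':'
      · subst hc
        have hp : List.isPrefixOf [':'] (':' :: rest) = true := by simp [List.isPrefixOf]
        simp only [PySem.Chars.splitOnMax.go, hp, if_pos]
        rw [pv_go0]
        simp [pvTw]
      · have hpre : List.isPrefixOf [':'] (c :: rest) = false := by
          simp only [List.isPrefixOf, Bool.and_eq_false_iff, beq_eq_false_iff_ne]
          exact Or.inl (fun h' => hc h'.symm)
        simp only [PySem.Chars.splitOnMax.go, hpre, Bool.false_eq_true, if_false, if_neg one_ne_zero]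
        have hl : rest.length < fuel := by simpa using h
        rw [ih fuel (c :: cur) acc hl]
        have htw : pvTw (c :: rest) = c :: pvTw rest := by
          simp [pvTw, List.takeWhile_cons, hc]
        by_cases hm : ':' ∈ rest
        · have hmm : ':' ∈ c :: rest := List.mem_cons_of_mem _ hm
          simp [hm, hmm, htw]
        · have hmm : ':' ∉ c :: rest := by
            simp only [List.mem_cons, not_or]
            exact ⟨fun h' => hc h'.symm, hm⟩
          simp [hm, hmm, htw]

theorem pv_splitOnMax_colon (l : List Char) :
    PySem.Chars.splitOnMax l [':'] 1 =
      if ':' ∈ l then [pvTw l, l.drop ((pvTw l).length + 1)] else [l] := by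
  have h1 : ¬ ((1 : Int) < 0) := by norm_num
  have h2 : (1 : Int).toNat = 1 := rfl
  simp only [PySem.Chars.splitOnMax, h1, if_false, h2]
  rw [pv_go1 l (l.length + 1) [] [] (by omega)]
  split <;> simp

theorem pv_lowerChar_colon (c : Char) : (PySem.Chars.lowerChar c = ':') ↔ c = ':' := by
  unfold PySem.Chars.lowerChar PySem.Chars.isupper
  split
  · rename_i h
    simp only [decide_eq_true_eq, Bool.and_eq_true] at h
    have hA : (65 : Nat) ≤ c.toNat := h.1
    have hZ : c.toNat ≤ 90 := h.2
    constructor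
    · intro he
      exfalso
      have hv : (c.toNat + 32).isValidChar := Or.inl (by omega)
      have := congrArg Char.toNat he
      rw [Char.toNat_ofNat] at this
      · simp only [hv, if_true] at this
        have : c.toNat + 32 = 58 := this
        omega
    · intro he
      subst he
      exfalso
      have : (58 : Nat) = Char.toNat ':' := rfl
      omega
  · exact Iff.rfl

theorem pv_tw_lower (l : List Char) : pvTw (PySem.Chars.lower l) = PySem.Chars.lower (pvTw l) := by
  unfold pvTw PySem.Chars.lower
  rw [List.takeWhile_map]
  have hp : ((fun c => !(c == ':')) ∘ PySem.Chars.lowerChar) = (fun c : Char => !(c == ':')) := by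
    funext c
    by_cases h : c = ':'
    · subst h
      simp [Function.comp_apply, (pv_lowerChar_colon ':').mpr rfl]
    · have h2 : PySem.Chars.lowerChar c ≠ ':' := fun hh => h ((pv_lowerChar_colon c).mp hh)
      simp [Function.comp_apply, h, h2]
  rw [hp]

theorem pv_mem_colon_lower (l : List Char) : ':' ∈ PySem.Chars.lower l ↔ ':' ∈ l := by
  unfold PySem.Chars.lower
  rw [List.mem_map]
  constructor
  · rintro ⟨c, hc, he⟩
    rwa [← (pv_lowerChar_colon c).mp he]
  · intro h
    exact ⟨':', h, (pv_lowerChar_colon ':').mpr rfl⟩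

theorem pv_startswith (L fcs : List Char) (hf : ':' ∉ fcs) :
    (PySem.Chars.startswith L (fcs ++ [':']) = true) ↔ ':' ∈ L ∧ pvTw L = fcs := by
  rw [PySem.Chars.startswith_iff]
  constructor
  · rintro ⟨t, ht⟩
    subst ht
    refine ⟨by simp, ?_⟩
    unfold pvTw
    rw [List.append_assoc, List.takeWhile_append]
    have hself : (fcs.takeWhile (fun c => !(c == ':'))) = fcs :=
      List.takeWhile_eq_self_iff.mpr (fun x hx => by
        simp only [Bool.not_eq_true', beq_eq_false_iff_ne, ne_eq]
        exact fun he => hf (he ▸ hx))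
    rw [hself, if_pos rfl]
    simp
  · rintro ⟨hm, htw⟩
    have hsplit : pvTw L ++ L.dropWhile (fun c => !(c == ':')) = L := List.takeWhile_append_dropWhile
    have hne : L.dropWhile (fun c => !(c == ':')) ≠ [] := by
      intro hnil
      rw [hnil, List.append_nil] at hsplit
      rw [← hsplit] at hm
      unfold pvTw at hm
      have := List.mem_takeWhile_imp hm
      simp at this
    have hhead : (L.dropWhile (fun c => !(c == ':'))).head? = some ':' := by
      rw [List.head?_eq_some_head hne]
      congr 1
      have := List.head_dropWhile_not (fun c => !(c == ':')) hne
      simpa using this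
    obtain ⟨d, td, hd⟩ := List.exists_cons_of_ne_nil hne
    rw [hd] at hhead
    simp only [List.head?_cons, Option.some.injEq] at hhead
    subst hhead
    refine ⟨td, ?_⟩
    rw [← htw, List.append_assoc]
    calc pvTw L ++ (':' :: td) = pvTw L ++ L.dropWhile (fun c => !(c == ':')) := by rw [hd]
    _ = L := hsplit

theorem pv_takeWhile_of_first (l : List Char) (k : Nat) (hk : k < l.length)
    (hfirst : ∀ j, j < k → ∀ (hj : j < l.length), l[j] ≠ ':') (hcolon : l[k] = ':') :
    pvTw l = l.take k := by
  induction l generalizing k with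
  | nil => simp at hk
  | cons c rest ih =>
    cases k with
    | zero =>
      simp only [List.getElem_cons_zero] at hcolon
      subst hcolon
      simp [pvTw]
    | succ k =>
      have hc : c ≠ ':' := by
        have := hfirst 0 (by omega) (by simp)
        simpa using this
      have htw : pvTw (c :: rest) = c :: pvTw rest := by simp [pvTw, hc]
      rw [htw, List.take_succ_cons]
      congr 1
      exact ih k (by simpa using hk)
        (fun j hj hjl => by
          have := hfirst (j+1) (by omega) (by simpa using hjl)
          simpa using this)
        (by simpa using hcolon)

theorem pv_find_no_colon (l : List Char) (h : ':' ∉ l) : PySem.Chars.find l [':'] = -1 := by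
  rw [PySem.Chars.find_eq_neg_one_iff]
  rw [List.singleton_infix_iff]
  exact h

theorem pv_find_colon (l : List Char) (h : ':' ∈ l) :
    PySem.Chars.find l [':'] = ((pvTw l).length : Int) ∧ (pvTw l).length < l.length := by
  have hnn : 0 ≤ PySem.Chars.find l [':'] :=
    (PySem.Chars.find_nonneg_iff l [':']).mpr ((List.singleton_infix_iff ..).mpr h)
  obtain ⟨hpre, hmin⟩ := PySem.Chars.find_spec hnn
  set k := (PySem.Chars.find l [':']).toNat with hkdef
  obtain ⟨t, ht⟩ := hpre
  have hdrop : l.drop k = ':' :: t := ht.symm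
  have hget : l[k]? = some ':' := by
    rw [← List.head?_drop, hdrop, List.head?_cons]
  have hklen : k < l.length := by
    by_contra hge
    rw [List.getElem?_eq_none (by omega)] at hget
    simp at hget
  have hgetE : l[k] = ':' := by
    have := List.getElem?_eq_getElem hklen
    rw [this] at hget
    exact Option.some.inj hget
  have hfirst : ∀ j, j < k → ∀ (hj : j < l.length), l[j] ≠ ':' := by
    intro j hj hjl he
    have hnp := hmin j hj
    apply hnp
    refine ⟨l.drop (j+1), ?_⟩
    have : l.drop j = ':' :: l.drop (j+1) := by
      rw [List.drop_eq_getElem_cons hjl, he]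
    rw [this]
    rfl
  have htake := pv_takeWhile_of_first l k hklen hfirst hgetE
  have hlen : (pvTw l).length = k := by
    rw [htake, List.length_take]
    omega
  refine ⟨?_, by omega⟩
  rw [hlen, hkdef, Int.toNat_of_nonneg hnn]

theorem pv_foldl_match {α β γ : Type} (l : List α) (q : α → Option β) (ins : γ → β → γ) (init : γ) :
    l.foldl (pvMstep q ins) init = (l.filterMap q).foldl ins init := by
  induction l generalizing init with
  | nil => rfl
  | cons x rest ih =>
    simp only [List.foldl_cons, List.filterMap_cons, pvMstep]
    cases hq : q x <;> simp only <;> rw [ih]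
    simp

theorem pv_fbl_get_aux (fns : List String) (d : PySem.Dict (List Char) String) (p : List Char) :
    (fns.foldl (fun d field =>
        let key := PySem.Chars.lower field.toList
        if d.contains key then d else d.insert key field) d).get? p
      = (d.get? p).or (fns.find? (fun f => PySem.Chars.lower f.toList == p)) := by
  induction fns generalizing d with
  | nil => simp
  | cons f rest ih =>
    simp only [List.foldl_cons, List.find?_cons]
    rw [ih]
    by_cases hc : d.contains (PySem.Chars.lower f.toList)
    · simp only [hc, if_true]
      by_cases hp : PySem.Chars.lower f.toList = p
      · subst hp
        have hs : ∃ v, d.get? (PySem.Chars.lower f.toList) = some v := by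
          rcases hv : d.get? (PySem.Chars.lower f.toList) with _ | v
          · rw [PySem.Dict.get?_eq_none_iff_contains] at hv
            rw [hv] at hc
            simp at hc
          · exact ⟨v, rfl⟩
        obtain ⟨v, hv⟩ := hs
        simp [hv]
      · simp [beq_eq_false_iff_ne.mpr hp]
    · simp only [hc, if_false, Bool.false_eq_true]
      by_cases hp : PySem.Chars.lower f.toList = p
      · subst hp
        rw [PySem.Dict.get?_insert]
        have hn : d.get? (PySem.Chars.lower f.toList) = none := by
          rw [PySem.Dict.get?_eq_none_iff_contains]
          simpa using hc
        simp [hn]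
      · rw [PySem.Dict.get?_insert]
        simp [hp, beq_eq_false_iff_ne.mpr hp, Ne.symm hp]

theorem pv_fbl_get (fns : List String) (p : List Char) :
    (pvFbl fns).get? p = fns.find? (fun f => PySem.Chars.lower f.toList == p) := by
  unfold pvFbl
  rw [pv_fbl_get_aux]
  simp

theorem pv_fbl_sound (fns : List String) (p : List Char) (f : String)
    (h : (pvFbl fns).get? p = some f) : PySem.Chars.lower f.toList = p := by
  rw [pv_fbl_get] at h
  have := List.find?_some h
  simpa using this

theorem pv_dbuild_get_aux {κ ν : Type} [BEq κ] [LawfulBEq κ] [DecidableEq κ]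
    (l : List (κ × ν)) (d : PySem.Dict κ ν) (k : κ) :
    (l.foldl pvDins d).get? k = (pvLastv l k).or (d.get? k) := by
  induction l generalizing d with
  | nil => simp [pvLastv]
  | cons pv rest ih =>
    simp only [List.foldl_cons]
    rw [ih]
    unfold pvLastv
    simp only [List.reverse_cons, List.find?_append]
    rw [Option.map_or, Option.or_assoc]
    congr 1
    unfold pvDins
    rw [PySem.Dict.get?_insert]
    by_cases hp : k = pv.1
    · subst hp
      simp
    · simp [hp, beq_eq_false_iff_ne.mpr (Ne.symm hp)]

theorem pv_dbuild_get {κ ν : Type} [BEq κ] [LawfulBEq κ] [DecidableEq κ] (l : List (κ × ν)) (k : κ) :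
    (pvDbuild l).get? k = pvLastv l k := by
  unfold pvDbuild
  rw [pv_dbuild_get_aux]
  simp

theorem pv_dbuild_keys {κ ν : Type} [BEq κ] [LawfulBEq κ] (l : List (κ × ν)) :
    (pvDbuild l).keys = PySem.Set.ofList (l.map Prod.fst) := by
  unfold pvDbuild pvDins
  rw [PySem.Dict.keys_foldl_insert_key l Prod.fst (fun _ pv => pv.2)]
  rw [PySem.Set.ofList_eq_foldl]
  rfl

theorem pv_dbuild_nodup {κ ν : Type} [BEq κ] [LawfulBEq κ] (l : List (κ × ν)) :
    (pvDbuild l).keys.Nodup := by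
  unfold pvDbuild pvDins
  exact PySem.Dict.nodup_keys_foldl_insert_key l Prod.fst (fun _ pv => pv.2) _ PySem.Dict.nodup_keys_empty

theorem pv_set_ofList_self {κ : Type} [BEq κ] [LawfulBEq κ] (xs : List κ) (h : xs.Nodup) :
    PySem.Set.ofList xs = xs := by
  induction xs using List.reverseRecOn with
  | nil => rfl
  | append_singleton l x ih =>
    rw [PySem.Set.ofList_eq_foldl, List.foldl_append, ← PySem.Set.ofList_eq_foldl]
    simp only [List.foldl_cons, List.foldl_nil]
    have hnd := List.nodup_append.mp h
    rw [ih hnd.1]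
    have hx : x ∉ l := by
      intro hx
      have := hnd.2.2
      exact this x hx x (by simp) rfl
    simp [PySem.Set.add, PySem.Set.contains, List.contains_eq_mem, hx]

theorem pv_set_filterMap {κ κ' : Type} [BEq κ] [LawfulBEq κ] [BEq κ'] [LawfulBEq κ'] (g : κ → Option κ')
    (hg : ∀ p q f, g p = some f → g q = some f → p = q) (xs : List κ) :
    PySem.Set.ofList (xs.filterMap g) = (PySem.Set.ofList xs).filterMap g := by
  induction xs using List.reverseRecOn with
  | nil => rfl
  | append_singleton l x ih =>
    rw [List.filterMap_append]
    rw [PySem.Set.ofList_eq_foldl, PySem.Set.ofList_eq_foldl, List.foldl_append, List.foldl_append,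
      ← PySem.Set.ofList_eq_foldl, ← PySem.Set.ofList_eq_foldl]
    cases hgx : g x with
    | none =>
      simp only [List.filterMap_cons, hgx, List.filterMap_nil, List.foldl_nil, List.foldl_cons]
      rw [ih]
      by_cases hc : x ∈ PySem.Set.ofList l
      · simp [PySem.Set.add, PySem.Set.contains, List.contains_eq_mem, hc]
      · unfold PySem.Set.add
        rw [if_neg (by simpa [PySem.Set.contains_iff] using hc)]
        rw [List.filterMap_append]
        simp [hgx]
    | some f =>
      simp only [List.filterMap_cons, hgx, List.filterMap_nil, List.foldl_cons, List.foldl_nil]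
      rw [ih]
      by_cases hc : x ∈ PySem.Set.ofList l
      · have hf : f ∈ (PySem.Set.ofList l).filterMap g := by
          rw [List.mem_filterMap]
          exact ⟨x, hc, hgx⟩
        simp [PySem.Set.add, PySem.Set.contains, List.contains_eq_mem, hc, hf]
      · have hf : f ∉ (PySem.Set.ofList l).filterMap g := by
          rw [List.mem_filterMap]
          rintro ⟨q, hq, hgq⟩
          exact hc ((hg x q f hgx hgq) ▸ hq)
        have hfc : ¬ (PySem.Set.contains ((PySem.Set.ofList l).filterMap g) f = true) := by
          simpa [PySem.Set.contains_iff] using hf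
        have hxc : ¬ (PySem.Set.contains (PySem.Set.ofList l) x = true) := by
          simpa [PySem.Set.contains_iff] using hc
        unfold PySem.Set.add
        rw [if_neg hfc, if_neg hxc, List.filterMap_append]
        simp [hgx]

theorem pv_find_filterMap (fns : List String) (k : String) (p0 : List Char)
    (hp0 : (pvFbl fns).get? p0 = some k) (X : List (List Char × List Char)) :
    (X.filterMap (pvH fns)).find? (fun y => y.1 == k)
      = (X.find? (fun pv => pv.1 == p0)).map (fun pv => (k, pvConv pv.2)) := by
  induction X with
  | nil => rfl
  | cons pv rest ih =>
    by_cases hp : pv.1 = p0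
    · have h1 : pvH fns pv = some (k, pvConv pv.2) := by
        unfold pvH
        rw [hp, hp0]
        rfl
      simp only [List.filterMap_cons, h1, List.find?_cons, beq_self_eq_true]
      simp [hp]
    · have hne : ∀ y, pvH fns pv = some y → y.1 ≠ k := by
        intro y hy hk
        unfold pvH at hy
        cases hg : (pvFbl fns).get? pv.1 with
        | none => rw [hg] at hy; simp at hy
        | some f =>
          rw [hg] at hy
          simp only [Option.map_some, Option.some.injEq] at hy
          apply hp
          rw [← hy] at hk
          simp only at hk
          rw [← pv_fbl_sound fns pv.1 f hg, ← pv_fbl_sound fns p0 k hp0, hk]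
      simp only [List.filterMap_cons]
      cases hy : pvH fns pv with
      | none =>
        rw [List.find?_cons_of_neg]
        · exact ih
        · simp [hp]
      | some y =>
        rw [List.find?_cons_of_neg, List.find?_cons_of_neg]
        · exact ih
        · simp [hp]
        · simp [hne y hy]

theorem pv_find_rev_nodup {κ ν : Type} [BEq κ] [LawfulBEq κ] (l : List (κ × ν)) (k : κ)
    (h : (l.map Prod.fst).Nodup) :
    l.reverse.find? (fun pv => pv.1 == k) = l.find? (fun pv => pv.1 == k) := by
  induction l with
  | nil => rfl
  | cons pv rest ih =>
    simp only [List.map_cons, List.nodup_cons] at h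
    simp only [List.reverse_cons, List.find?_append, List.find?_cons]
    by_cases hp : pv.1 = k
    · have hnone : rest.find? (fun q => q.1 == k) = none := by
        rw [List.find?_eq_none]
        intro q hq hqk
        apply h.1
        rw [List.mem_map]
        exact ⟨q, hq, by simpa [hp] using hqk⟩
      have hnone' : rest.reverse.find? (fun q => q.1 == k) = none := by
        rw [List.find?_eq_none] at hnone ⊢
        intro q hq
        exact hnone q (List.mem_reverse.mp hq)
      simp [hnone', hp]
    · rw [ih h.2]
      cases hf : rest.find? (fun q => q.1 == k) <;>
        simp [hf, beq_eq_false_iff_ne.mpr hp]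

theorem pv_h_fst (fns : List String) (pv : List Char × List Char) :
    (pvH fns pv).map Prod.fst = (pvFbl fns).get? pv.1 := by
  unfold pvH
  cases (pvFbl fns).get? pv.1 <;> rfl

theorem pv_g_inj (fns : List String) :
    ∀ p q f, (pvFbl fns).get? p = some f → (pvFbl fns).get? q = some f → p = q := by
  intro p q f hp hq
  rw [← pv_fbl_sound fns p f hp, ← pv_fbl_sound fns q f hq]

theorem pv_map_fst_filterMap (fns : List String) (X : List (List Char × List Char)) :
    (X.filterMap (pvH fns)).map Prod.fst = (X.map Prod.fst).filterMap ((pvFbl fns).get?) := by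
  rw [List.map_filterMap, List.filterMap_map]
  congr 1
  funext pv
  exact pv_h_fst fns pv

theorem pv_core (fns : List String) (M : List (List Char × List Char)) :
    (pvDbuild (M.filterMap (pvH fns))).items
      = (pvDbuild ((pvDbuild M).items.filterMap (pvH fns))).items := by
  have hg := pv_g_inj fns
  set g := (pvFbl fns).get? with hgdef
  set X := M.filterMap (pvH fns) with hX
  set Y := (pvDbuild M).items.filterMap (pvH fns) with hY
  -- keys agree
  have hitems_fst : (pvDbuild M).items.map Prod.fst = (pvDbuild M).keys := rfl
  have hkeysX : (pvDbuild X).keys = PySem.Set.ofList ((M.map Prod.fst).filterMap g) := by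
    rw [pv_dbuild_keys, hX, pv_map_fst_filterMap]
  have hkeysY : (pvDbuild Y).keys = PySem.Set.ofList ((M.map Prod.fst).filterMap g) := by
    rw [pv_dbuild_keys, hY, pv_map_fst_filterMap, hitems_fst, pv_dbuild_keys]
    rw [pv_set_filterMap g hg (PySem.Set.ofList (M.map Prod.fst)),
      pv_set_ofList_self _ (PySem.Set.nodup_ofList _), ← pv_set_filterMap g hg]
  have hkeys : (pvDbuild X).keys = (pvDbuild Y).keys := by rw [hkeysX, hkeysY]
  -- values agree
  have hval : ∀ k, (pvDbuild X).get? k = (pvDbuild Y).get? k := by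
    intro k
    rw [pv_dbuild_get, pv_dbuild_get]
    by_cases hex : ∃ p0, g p0 = some k
    · obtain ⟨p0, hp0⟩ := hex
      unfold pvLastv
      rw [hX, hY, ← List.filterMap_reverse, ← List.filterMap_reverse,
        pv_find_filterMap fns k p0 hp0, pv_find_filterMap fns k p0 hp0]
      rw [Option.map_map, Option.map_map]
      have hM : (M.reverse.find? (fun pv => pv.1 == p0)) = ((pvDbuild M).items.reverse.find? (fun pv => pv.1 == p0)) := by
        rw [pv_find_rev_nodup ((pvDbuild M).items) p0 (by rw [hitems_fst]; exact pv_dbuild_nodup M)]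
        have h1 : pvLastv M p0 = (pvDbuild M).get? p0 := (pv_dbuild_get M p0).symm
        unfold pvLastv at h1
        have h2 : (pvDbuild M).get? p0 = ((pvDbuild M).items.find? (fun p => p.1 == p0)).map (·.2) := rfl
        have h3 : (M.reverse.find? (fun pv => pv.1 == p0)).map (·.2)
            = ((pvDbuild M).items.find? (fun pv => pv.1 == p0)).map (·.2) := by
          rw [h1, h2]
        cases ha : M.reverse.find? (fun pv => pv.1 == p0) with
        | none =>
          cases hb : (pvDbuild M).items.find? (fun pv => pv.1 == p0) with
          | none => rfl
          | some b => rw [ha, hb] at h3; simp at h3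
        | some a =>
          cases hb : (pvDbuild M).items.find? (fun pv => pv.1 == p0) with
          | none => rw [ha, hb] at h3; simp at h3
          | some b =>
            rw [ha, hb] at h3
            simp only [Option.map_some, Option.some.injEq] at h3
            have ha1 : a.1 = p0 := by simpa using List.find?_some ha
            have hb1 : b.1 = p0 := by simpa using List.find?_some hb
            congr 1
            exact Prod.ext (ha1.trans hb1.symm) h3
      rw [hM]
    · have hnone : ∀ (Z : List (List Char × List Char)),
          pvLastv (Z.filterMap (pvH fns)) k = none := by
        intro Z
        unfold pvLastv
        rw [Option.map_eq_none_iff, List.find?_eq_none]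
        intro y hy
        rw [List.mem_reverse, List.mem_filterMap] at hy
        obtain ⟨pv, _, hpv⟩ := hy
        unfold pvH at hpv
        cases hgv : (pvFbl fns).get? pv.1 with
        | none => rw [hgv] at hpv; simp at hpv
        | some f =>
          rw [hgv] at hpv
          simp only [Option.map_some, Option.some.injEq] at hpv
          simp only [beq_iff_eq]
          intro hyk
          apply hex
          refine ⟨pv.1, ?_⟩
          rw [hgdef, hgv]
          rw [← hpv] at hyk
          simp only at hyk
          rw [hyk]
      rw [hX, hY, hnone, hnone]
  -- assemble
  rw [PySem.Dict.items_eq_map_keys _ (pv_dbuild_nodup X) none,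
    PySem.Dict.items_eq_map_keys _ (pv_dbuild_nodup Y) none, hkeys]
  apply List.map_congr_left
  intro k _
  rw [PySem.Dict.getD_eq_get?_getD, PySem.Dict.getD_eq_get?_getD, hval k]

theorem pv_findfield (fns : List String) (line : List Char)
    (hpre : ∀ f ∈ fns, ':' ∉ f.toList ∨
      PySem.Chars.startswith (PySem.Chars.lower line) (PySem.Chars.lower f.toList ++ [':']) = false) :
    fns.find? (fun field => PySem.Chars.startswith (PySem.Chars.lower line) (PySem.Chars.lower field.toList ++ [':']))
      = if ':' ∈ line then (pvFbl fns).get? (pvTw (PySem.Chars.lower line)) else none := by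
  rw [pv_fbl_get]
  induction fns with
  | nil => simp
  | cons f rest ih =>
    have hrest := ih (fun x hx => hpre x (List.mem_cons_of_mem _ hx))
    by_cases hcf : ':' ∈ f.toList
    · have hsw : PySem.Chars.startswith (PySem.Chars.lower line) (PySem.Chars.lower f.toList ++ [':']) = false :=
        ((hpre f (List.mem_cons_self ..)).resolve_left (fun h => h hcf))
      have hbq : (PySem.Chars.lower f.toList == pvTw (PySem.Chars.lower line)) = false := by
        refine beq_eq_false_iff_ne.mpr (fun he => ?_)
        have hmem : ':' ∈ pvTw (PySem.Chars.lower line) := by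
          rw [← he, pv_mem_colon_lower]
          exact hcf
        have := List.mem_takeWhile_imp hmem
        simp at this
      rw [List.find?_cons_of_neg (p := fun field : String => PySem.Chars.startswith (PySem.Chars.lower line) (PySem.Chars.lower field.toList ++ [':'])) (by simp [hsw]),
        hrest]
      by_cases hm : ':' ∈ line
      · rw [if_pos hm, if_pos hm,
          List.find?_cons_of_neg (p := fun f : String => PySem.Chars.lower f.toList == pvTw (PySem.Chars.lower line)) (by simp [hbq])]
      · rw [if_neg hm, if_neg hm]
    · have hf : ':' ∉ PySem.Chars.lower f.toList := by
        rw [pv_mem_colon_lower]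
        exact hcf
      by_cases hm : ':' ∈ line
      · by_cases hpred : pvTw (PySem.Chars.lower line) = PySem.Chars.lower f.toList
        · have hsw : PySem.Chars.startswith (PySem.Chars.lower line) (PySem.Chars.lower f.toList ++ [':']) = true :=
            (pv_startswith _ _ hf).mpr ⟨(pv_mem_colon_lower line).mpr hm, hpred⟩
          rw [List.find?_cons_of_pos (p := fun field : String => PySem.Chars.startswith (PySem.Chars.lower line) (PySem.Chars.lower field.toList ++ [':'])) hsw,
            if_pos hm,
            List.find?_cons_of_pos (p := fun f : String => PySem.Chars.lower f.toList == pvTw (PySem.Chars.lower line)) (by simp [hpred])]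
        · have hsw : ¬ (PySem.Chars.startswith (PySem.Chars.lower line) (PySem.Chars.lower f.toList ++ [':']) = true) := by
            rw [pv_startswith _ _ hf]
            rintro ⟨_, h2⟩
            exact hpred h2
          rw [List.find?_cons_of_neg (p := fun field : String => PySem.Chars.startswith (PySem.Chars.lower line) (PySem.Chars.lower field.toList ++ [':'])) (by simpa using hsw),
            hrest, if_pos hm, if_pos hm,
            List.find?_cons_of_neg (p := fun f : String => PySem.Chars.lower f.toList == pvTw (PySem.Chars.lower line))]
          exact fun hb => hpred (eq_of_beq hb).symm
      · have hsw : ¬ (PySem.Chars.startswith (PySem.Chars.lower line) (PySem.Chars.lower f.toList ++ [':']) = true) := by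
          rw [pv_startswith _ _ hf]
          rintro ⟨h1, _⟩
          exact hm ((pv_mem_colon_lower line).mp h1)
        rw [List.find?_cons_of_neg (p := fun field : String => PySem.Chars.startswith (PySem.Chars.lower line) (PySem.Chars.lower field.toList ++ [':'])) (by simpa using hsw),
          hrest, if_neg hm, if_neg hm]

theorem pv_portA (lo : String) (fns : List String)
    (hpre : ∀ f ∈ fns, ':' ∈ f.toList →
      ∀ line ∈ PySem.Chars.splitlines lo.toList,
        PySem.Chars.startswith (PySem.Chars.lower line) (PySem.Chars.lower f.toList ++ [':']) = false) :
    extract_llm_response lo fns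
      = (pvDbuild (((PySem.Chars.splitlines lo.toList).filterMap pvPline).filterMap (pvH fns))).items := by
  unfold extract_llm_response
  congr 1
  have hbody : ∀ (r : PySem.Dict String (Option String)), ∀ line ∈ PySem.Chars.splitlines lo.toList,
      (match fns.find? (fun field =>
          PySem.Chars.startswith (PySem.Chars.lower line) (PySem.Chars.lower field.toList ++ [':'])) with
      | some field =>
          r.insert field (if PySem.Chars.lower (PySem.Chars.strip ((PySem.List.pyGet? (PySem.Chars.splitOnMax line [':'] 1) 1).getD [])) ≠ "none".toList then some (String.ofList (PySem.Chars.strip ((PySem.List.pyGet? (PySem.Chars.splitOnMax line [':'] 1) 1).getD []))) else none)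
      | none => r)
      = pvMstep (fun line => (pvPline line).bind (pvH fns)) pvDins r line := by
    unfold pvMstep
    intro r line hline
    rw [pv_findfield fns line (fun f hf => by
      by_cases hcf : ':' ∈ f.toList
      · exact Or.inr (hpre f hf hcf line hline)
      · exact Or.inl hcf)]
    by_cases hm : ':' ∈ line
    · rw [if_pos hm]
      have hsplit := pv_splitOnMax_colon line
      rw [if_pos hm] at hsplit
      have hval : PySem.Chars.strip ((PySem.List.pyGet? (PySem.Chars.splitOnMax line [':'] 1) 1).getD []) = pvVl line := by
        rw [hsplit]
        simp [PySem.List.pyGet?, PySem.List.pyIdx?, pvVl]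
      rw [hval]
      simp only [pvPline, hm, if_true]
      rw [show (some (pvTw (PySem.Chars.lower line), pvVl line)).bind (pvH fns)
            = pvH fns (pvTw (PySem.Chars.lower line), pvVl line) from rfl]
      unfold pvH
      cases hg : (pvFbl fns).get? (pvTw (PySem.Chars.lower line)) with
      | none => simp
      | some f =>
        simp only [Option.map_some, pvDins, pvConv, ite_not]
    · rw [if_neg hm]
      simp [pvPline, hm]
  calc (PySem.Chars.splitlines lo.toList).foldl _ PySem.Dict.empty
      = (PySem.Chars.splitlines lo.toList).foldl (pvMstep (fun line => (pvPline line).bind (pvH fns)) pvDins) PySem.Dict.empty := by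
        apply PySem.List.foldl_congr_mem
        intro acc x hx
        exact hbody acc x hx
    _ = (((PySem.Chars.splitlines lo.toList).filterMap (fun line => (pvPline line).bind (pvH fns))).foldl pvDins PySem.Dict.empty) :=
        pv_foldl_match (PySem.Chars.splitlines lo.toList) (fun line => (pvPline line).bind (pvH fns)) pvDins PySem.Dict.empty
    _ = (pvDbuild (((PySem.Chars.splitlines lo.toList).filterMap pvPline).filterMap (pvH fns))) := by
        rw [List.filterMap_filterMap]
        rfl

theorem pv_portB (lo : String) (fns : List String) :
    extract_llm_response_alt lo fns
      = (pvDbuild ((pvDbuild ((PySem.Chars.splitlines lo.toList).filterMap pvPline)).items.filterMap (pvH fns))).items := by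
  have h0 : extract_llm_response_alt lo fns
      = (((PySem.Chars.splitlines lo.toList).foldl pvBstep PySem.Dict.empty).items.foldl
          (pvBouter fns) PySem.Dict.empty).items := rfl
  rw [h0]
  have hstep : ∀ (m : PySem.Dict (List Char) (List Char)) (line : List Char),
      pvBstep m line = pvMstep pvPline pvDins m line := by
    intro m line
    unfold pvBstep
    by_cases hm : ':' ∈ line
    · obtain ⟨hfind, hlt⟩ := pv_find_colon line hm
      show (if PySem.Chars.find line [':'] ≠ -1 then _ else m) = _
      rw [hfind]
      have hne : ((pvTw line).length : Int) ≠ -1 := by omega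
      rw [if_pos hne]
      have h1 : PySem.List.slice line none (some ((pvTw line).length : Int)) = pvTw line := by
        rw [PySem.List.slice_to line (by positivity)]
        simp only [Int.toNat_natCast]
        exact (List.prefix_iff_eq_take.mp (List.takeWhile_prefix _)).symm
      have h2 : PySem.List.slice line (some (((pvTw line).length : Int) + 1)) none
          = line.drop ((pvTw line).length + 1) := by
        have hc : (((pvTw line).length : Int) + 1) = (((pvTw line).length + 1 : Nat) : Int) := by push_cast; ring
        rw [hc, PySem.List.slice_from line (by positivity)]
        simp
      rw [h1, h2, ← pv_tw_lower]
      simp only [pvMstep, pvPline, hm, if_true, pvDins]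
      rfl
    · show (if PySem.Chars.find line [':'] ≠ -1 then _ else m) = _
      rw [pv_find_no_colon line hm]
      simp [pvMstep, pvPline, hm]
  have houter : ∀ (r : PySem.Dict String (Option String)) (pv : List Char × List Char),
      pvBouter fns r pv = pvMstep (pvH fns) pvDins r pv := by
    intro r pv
    unfold pvBouter pvMstep pvH
    cases hg : (pvFbl fns).get? pv.1 with
    | none => simp
    | some f => simp only [Option.map_some, pvDins, pvConv]
  rw [PySem.List.foldl_congr_mem _ pvBstep (pvMstep pvPline pvDins) _
      (fun m line _ => hstep m line), pv_foldl_match]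
  rw [PySem.List.foldl_congr_mem _ (pvBouter fns) (pvMstep (pvH fns) pvDins) _
      (fun r pv _ => houter r pv), pv_foldl_match]
  rfl

-- ===== VERDICT (by name: the statement is the Claim_ definition above) =====
theorem extract_llm_response_spec : Claim_equal_extract_llm_response := by
  intro lo fns _dom hpre
  unfold Spec_extract_llm_response
  rw [pv_portA lo fns hpre, pv_portB lo fns, pv_core]
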